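-- pv_equiv track=rewrite | github.com/ynaima/club-recommendat-system | club recommendation/club_functions.py | invert_and_sort
-- ===== SOURCE A (Python) =====
-- from typing import List, Tuple, Dict, TextIO
--
-- def invert_and_sort(key_to_value: Dict[object, object]) -> Dict[object, list]:
--     """Return key_to_value inverted so that each key is a value (for
--     non-list values) or an item from an iterable value, and each value
--     is a list of the corresponding keys from key_to_value.  The value
--     lists in the returned dict are sorted.
--
--     >>> invert_and_sort(P2C) == {
--     ...  'Comet Club': ['Michelle Tanner'],
--     ...  'Parent Council': ['Danny R Tanner', 'Jesse Katsopolis',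
--     ...                     'Joey Gladstone'],
--     ...  'Rock N Rollers': ['Jesse Katsopolis', 'Kimmy Gibbler'],
--     ...  'Comics R Us': ['Joey Gladstone'],
--     ...  'Smash Club': ['Kimmy Gibbler']}
--     True
--     """
--     inverted_dict = {}
--     clubs_list = []
--
--     for name in key_to_value:
--         for club in key_to_value[name]:
--             if club not in clubs_list:
--                 clubs_list.append(club)
--
--     for club in clubs_list:
--         inverted_dict[club] = []
--         for name in key_to_value:
--             if club in key_to_value[name]:
--                 inverted_dict[club].append(name)
--
--     for club in inverted_dict:
--         inverted_dict[club].sort()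
--     return inverted_dict
-- ===== SOURCE B (Python) =====
-- def invert_and_sort(key_to_value):
--     """Single pass: flatten to (club, name) pairs (clubs de-duplicated per
--     name), group the names per club in one dict pass, then sort each list."""
--     pairs = [(club, name) for name, clubs in key_to_value.items()
--              for club in dict.fromkeys(clubs)]
--     inverted = {}
--     for club, name in pairs:
--         inverted.setdefault(club, []).append(name)
--     return {club: sorted(names) for club, names in inverted.items()}
-- ===== Notes on version B (the rewrite author's own statement) =====
-- stated objective: faster
-- what changed: Replaces A's three nested scans (dedup clubs by repeated membership tests, then for every club a full rescan of the dict) by one flattening pass into (club, name) pairs grouped into a dict in one pass, then sorting each list.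
import Mathlib
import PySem

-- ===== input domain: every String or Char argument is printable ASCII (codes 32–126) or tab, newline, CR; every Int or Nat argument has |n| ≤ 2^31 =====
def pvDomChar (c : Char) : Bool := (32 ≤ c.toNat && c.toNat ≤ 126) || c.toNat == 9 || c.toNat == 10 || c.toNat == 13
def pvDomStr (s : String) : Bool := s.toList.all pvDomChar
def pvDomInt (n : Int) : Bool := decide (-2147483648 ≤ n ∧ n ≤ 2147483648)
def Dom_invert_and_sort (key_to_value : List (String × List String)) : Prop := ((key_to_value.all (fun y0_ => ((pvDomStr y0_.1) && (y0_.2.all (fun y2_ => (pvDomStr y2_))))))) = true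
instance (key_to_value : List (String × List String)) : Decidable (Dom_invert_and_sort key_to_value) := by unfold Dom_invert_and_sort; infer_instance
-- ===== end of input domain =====

-- B replaces A's three nested scans by one flattening pass into (club, name)
-- pairs grouped in a single dict pass, then a sort per club (objective: faster).

-- ===== PORT A =====
-- Literal port of A: first loop collects the clubs in first-seen order with a
-- membership test before each append; second loop builds, for each such club
-- (the keys are fresh and distinct, so 'inverted_dict[club] = []' + appends
-- builds exactly the pair appended here), the list of names whose club list
-- contains it; third loop sorts each list in place.
def invert_and_sort (key_to_value : List (String × List String)) : List (String × List String) :=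
  let clubs_list : List String := key_to_value.foldl
    (fun cl p => p.2.foldl (fun cl club => if club ∈ cl then cl else cl ++ [club]) cl) []
  let inverted_dict : List (String × List String) := clubs_list.foldl
    (fun inv club => inv ++ [(club,
      key_to_value.foldl (fun acc p => if club ∈ p.2 then acc ++ [p.1] else acc) [])]) []
  inverted_dict.map (fun q => (q.1, PySem.List.sorted q.2 (fun x => x) false))

-- ===== PORT B =====
-- Port of Source B: the pair comprehension, the setdefault/append grouping loop
-- (d.setdefault(c, []).append(n) sets d[c] to d.get(c, []) ++ [n] = Dict.modify),
-- and the final sorting comprehension over the dict's items.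
def invert_and_sort_alt (key_to_value : List (String × List String)) : List (String × List String) :=
  let pairs : List (String × String) := key_to_value.flatMap
    (fun p => (PySem.List.dedup p.2).map (fun club => (club, p.1)))
  let inverted : PySem.Dict String (List String) := pairs.foldl
    (fun d q => d.modify q.1 [] (fun ns => ns ++ [q.2])) PySem.Dict.empty
  inverted.items.map (fun q => (q.1, PySem.List.sorted q.2 (fun x => x) false))

-- ===== PRECONDITION & SPEC =====
def Spec_invert_and_sort (key_to_value : List (String × List String)) (out : List (String × List String)) : Prop := out = invert_and_sort_alt key_to_value
instance (key_to_value : List (String × List String)) (out : List (String × List String)) : Decidable (Spec_invert_and_sort key_to_value out) := by unfold Spec_invert_and_sort; infer_instance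

-- ===== CLAIM (what is proved, stated in full; the proofs are below) =====
def Claim_equal_invert_and_sort : Prop := ∀ (key_to_value : List (String × List String)), Dom_invert_and_sort key_to_value → Spec_invert_and_sort key_to_value (invert_and_sort key_to_value)

-- ===== LEMMAS AND PROOFS =====

-- Both programs, reduced, produce this: the clubs in first-seen order, each
-- paired with the sorted list of names whose club list contains it.
def pvCanon (ktv : List (String × List String)) : List (String × List String) :=
  (PySem.Set.ofList (ktv.flatMap Prod.snd)).map
    (fun c => (c, PySem.List.sorted ((ktv.filter (fun p => decide (c ∈ p.2))).map Prod.fst) (fun x => x) false))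

-- A's first loop is Set.update iterated over the value lists.
theorem pv_clubsFold_eq (t : List (String × List String)) (s : List String) :
    t.foldl (fun cl p => p.2.foldl (fun cl club => if club ∈ cl then cl else cl ++ [club]) cl) s
      = PySem.Set.update s (t.flatMap Prod.snd) := by
  have hinner : ∀ (s : List String) (l : List String),
      l.foldl (fun cl club => if club ∈ cl then cl else cl ++ [club]) s = PySem.Set.update s l := by
    intro s l
    have : (fun (cl : List String) (club : String) => if club ∈ cl then cl else cl ++ [club])
        = fun cl club => PySem.Set.add cl club := by
      funext cl club; rw [PySem.Set.add_eq_ite]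
    rw [this]; rfl
  induction t generalizing s with
  | nil => simp [PySem.Set.update_nil]
  | cons p t ih =>
    simp only [List.foldl_cons, List.flatMap_cons, PySem.Set.update_append]
    rw [ih, hinner]

theorem pv_update_dedup (s : List String) (xs : List String) :
    PySem.Set.update s (PySem.List.dedup xs) = PySem.Set.update s xs := by
  rw [PySem.Set.update_eq_append_filter, PySem.Set.update_eq_append_filter]
  simp [PySem.Set.ofList_ofList]

theorem pv_update_flatMap_dedup (t : List (String × List String)) (s : List String) :
    PySem.Set.update s (t.flatMap (fun p => PySem.List.dedup p.2))
      = PySem.Set.update s (t.flatMap Prod.snd) := by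
  induction t generalizing s with
  | nil => rfl
  | cons p t ih =>
    simp only [List.flatMap_cons, PySem.Set.update_append, pv_update_dedup, ih]

-- filtering a duplicate-free list for one element
theorem pv_filter_nodup_eq (c : String) (l : List String) (h : l.Nodup) :
    l.filter (fun x => x == c) = if c ∈ l then [c] else [] := by
  induction l with
  | nil => simp
  | cons x t ih =>
    rcases List.nodup_cons.mp h with ⟨hx, ht⟩
    by_cases hxc : x = c
    · subst hxc
      have : t.filter (fun y => y == x) = [] := by
        rw [List.filter_eq_nil_iff]; intro a ha
        simp only [beq_iff_eq]
        intro h'; exact hx (h' ▸ ha)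
      simp [this]
    · have : (x == c) = false := by simp [hxc]
      simp only [List.filter_cons, this, ih ht, List.mem_cons]
      by_cases hc : c ∈ t
      · simp [hc, Ne.symm hxc]
      · simp [hc, Ne.symm hxc]

-- B's grouped names for club c = A's filtered names for club c.
theorem pv_pairs_filter (ktv : List (String × List String)) (c : String) :
    ((ktv.flatMap (fun p => (PySem.Set.ofList p.2).map (fun club => (club, p.1)))).filter
        (fun q => q.1 == c)).map (fun x => x.2)
      = (ktv.filter (fun p => decide (c ∈ p.2))).map Prod.fst := by
  induction ktv with
  | nil => rfl
  | cons p t ih =>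
    simp only [List.flatMap_cons, List.filter_append, List.map_append, ih, List.filter_cons]
    have hfil : ((PySem.Set.ofList p.2).map (fun club => (club, p.1))).filter (fun q => q.1 == c)
        = ((PySem.Set.ofList p.2).filter (fun x => x == c)).map (fun club => (club, p.1)) := by
      rw [List.filter_map]; rfl
    rw [hfil, pv_filter_nodup_eq c _ (PySem.Set.nodup_ofList p.2)]
    by_cases hc : c ∈ p.2
    · have hm : c ∈ PySem.Set.ofList p.2 := by
        rw [PySem.Set.mem_ofList]; exact hc
      simp [hm, hc]
    · have hm : c ∉ PySem.Set.ofList p.2 := by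
        rw [PySem.Set.mem_ofList]; exact hc
      simp [hm, hc]

-- A's per-club inner scan is a filter.
theorem pv_A_names (ktv : List (String × List String)) (c : String) :
    ktv.foldl (fun acc p => if c ∈ p.2 then acc ++ [p.1] else acc) []
      = (ktv.filter (fun p => decide (c ∈ p.2))).map Prod.fst := by
  have h := PySem.List.foldl_append_if (fun p : String × List String => decide (c ∈ p.2)) Prod.fst ktv []
  simpa using h

theorem pv_A_eq_canon (ktv : List (String × List String)) :
    invert_and_sort ktv = pvCanon ktv := by
  unfold invert_and_sort pvCanon
  dsimp only
  rw [pv_clubsFold_eq, PySem.Set.update_nil_left]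
  rw [PySem.List.foldl_append_singleton_eq_map]
  simp only [List.nil_append, List.map_map]
  apply List.map_congr_left
  intro c _
  simp [pv_A_names]

theorem pv_B_eq_canon (ktv : List (String × List String)) :
    invert_and_sort_alt ktv = pvCanon ktv := by
  unfold invert_and_sort_alt pvCanon
  dsimp only
  have hnodup : ((ktv.flatMap (fun p => (PySem.List.dedup p.2).map (fun club => (club, p.1)))).foldl
      (fun d q => d.modify q.1 [] (fun ns => ns ++ [q.2])) PySem.Dict.empty).keys.Nodup := by
    exact PySem.Dict.nodup_keys_foldl_modify_key _ Prod.fst [] (fun _ q => (fun ns => ns ++ [q.2])) _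
      (by simp [PySem.Dict.keys_empty])
  rw [PySem.Dict.items_eq_map_keys _ hnodup []]
  rw [PySem.Dict.keys_foldl_modify_key _ Prod.fst [] (fun _ q => (fun ns => ns ++ [q.2]))]
  have hkeys : PySem.Set.update (PySem.Dict.empty : PySem.Dict String (List String)).keys
      ((ktv.flatMap (fun p => (PySem.List.dedup p.2).map (fun club => (club, p.1)))).map Prod.fst)
      = PySem.Set.ofList (ktv.flatMap Prod.snd) := by
    have hm : (ktv.flatMap (fun p => (PySem.List.dedup p.2).map (fun club => (club, p.1)))).map Prod.fst
        = ktv.flatMap (fun p => PySem.List.dedup p.2) := by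
      simp [List.map_flatMap, Function.comp_def]
    rw [hm]
    have := pv_update_flatMap_dedup ktv ([] : List String)
    simpa [PySem.Set.update_nil_left, PySem.Dict.keys_empty] using this
  rw [hkeys]
  simp only [List.map_map]
  apply List.map_congr_left
  intro c _
  have hget := PySem.Dict.getD_foldl_modify_append
      (ktv.flatMap (fun p => (PySem.List.dedup p.2).map (fun club => (club, p.1))))
      (PySem.Dict.empty : PySem.Dict String (List String)) c
  simp only [Function.comp_apply]
  rw [hget]
  simp only [PySem.Dict.getD_empty, List.nil_append, PySem.List.dedup_eq_ofList]
  rw [pv_pairs_filter ktv c]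

-- ===== VERDICT (by name: the statement is the Claim_ definition above) =====
theorem invert_and_sort_spec : Claim_equal_invert_and_sort := by
  intro ktv _
  unfold Spec_invert_and_sort
  rw [pv_A_eq_canon, pv_B_eq_canon]
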